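-- pv_equiv track=rewrite | github.com/dudamarlena/pyc_source | pycfiles/pwclip-1.7.11.linux-x86_64.tar/gpgtools.cpython-36.py | _listsecs
-- ===== SOURCE A (Python) =====
-- def _listsecs(kllis, pattern=None):
--     ksdics = {}
--     kdic = {}
--     for kl in kllis:
--         t, dat = kl.split(':')[0], ':'.join(kl.split(':')[1:])
--         if t == 'sec':
--             if kdic:
--                 uid = kdic['uid']
--                 del kdic['uid']
--                 ksdics[uid] = kdic
--                 kdic = {}
--             kdic[t] = dat
--         else:
--             kdic[t] = dat
--
--     return ksdics
-- ===== SOURCE B (Python) =====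
-- def _listsecs(kllis, pattern=None):
--     # Pass 1: partition the lines into groups; a new group starts at each 'sec' line.
--     done, cur = [], []
--     for kl in kllis:
--         if kl.split(':')[0] == 'sec':
--             done.append(cur)
--             cur = [kl]
--         else:
--             cur.append(kl)
--     # 'cur' now holds the final group, which is never flushed.
--     # Pass 2: turn each completed non-empty group into a dict and key it by its uid.
--     ksdics = {}
--     for g in done:
--         if g:
--             d = {kl.split(':')[0]: ':'.join(kl.split(':')[1:]) for kl in g}
--             uid = d.pop('uid')
--             ksdics[uid] = d
--     return ksdics
-- ===== Notes on version B (the rewrite author's own statement) =====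
-- stated objective: alternative
-- what changed: A flushes sections while scanning with a mutable current-dict; B first partitions the lines into 'sec'-delimited groups in one pass, then builds a dict per completed group and keys it by its popped uid in a second pass.
import Mathlib
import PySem

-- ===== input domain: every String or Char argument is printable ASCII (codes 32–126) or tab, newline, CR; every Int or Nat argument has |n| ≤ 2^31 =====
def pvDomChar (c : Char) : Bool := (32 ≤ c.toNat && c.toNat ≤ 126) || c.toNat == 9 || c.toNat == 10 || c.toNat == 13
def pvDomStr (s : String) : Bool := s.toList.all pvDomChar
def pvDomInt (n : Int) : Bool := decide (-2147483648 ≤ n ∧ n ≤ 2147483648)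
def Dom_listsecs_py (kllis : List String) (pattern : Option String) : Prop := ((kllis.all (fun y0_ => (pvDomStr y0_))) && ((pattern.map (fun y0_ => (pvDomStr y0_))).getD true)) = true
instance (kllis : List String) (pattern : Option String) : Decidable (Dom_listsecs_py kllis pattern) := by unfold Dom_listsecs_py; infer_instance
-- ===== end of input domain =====

-- B replaces A's interleaved flush-while-scanning loop by two passes (partition the lines
-- into 'sec'-groups first, then turn each completed group into a dict); same return value.

-- both Pythons compute kl.split(':')[0] and ':'.join(kl.split(':')[1:]) for a line
def pvField (kl : String) : String × String :=
  -- sep ":" ≠ "", so Python's kl.split(':') never raises: split? is always `some`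
  let parts := (PySem.Str.split? kl ":").getD []
  (parts.headD "", PySem.Str.join ":" (parts.drop 1))

-- ===== PORT A =====
-- loop body of A: state = (ksdics, kdic); `if kdic:` is the non-emptiness test;
-- Python's kdic['uid'] raises KeyError when 'uid' is absent — Pre_ excludes that, getD's default is never read inside Pre_
def pvStepA (st : PySem.Dict String (PySem.Dict String String) × PySem.Dict String String)
    (kl : String) : PySem.Dict String (PySem.Dict String String) × PySem.Dict String String :=
  let t := (pvField kl).1
  let dat := (pvField kl).2
  if t = "sec" then
    if st.2.items.isEmpty then (st.1, st.2.insert t dat)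
    else (st.1.insert (st.2.getD "uid" "") (st.2.erase "uid"), PySem.Dict.empty.insert t dat)
  else (st.1, st.2.insert t dat)

def listsecs_py (kllis : List String) (pattern : Option String) : List (String × List (String × String)) :=
  ((kllis.foldl pvStepA (PySem.Dict.empty, PySem.Dict.empty)).1).items.map (fun p => (p.1, p.2.items))

-- ===== PORT B =====
-- pass 1 body: state = (done, cur); a new group starts at each 'sec' line
def pvGroupStep (st : List (List String) × List String) (kl : String) :
    List (List String) × List String :=
  if (pvField kl).1 = "sec" then (st.1 ++ [st.2], [kl]) else (st.1, st.2 ++ [kl])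

-- the dict comprehension of Source B
def pvBuild (g : List String) : PySem.Dict String String :=
  g.foldl (fun d kl => d.insert (pvField kl).1 (pvField kl).2) PySem.Dict.empty

-- pass 2 body: d.pop('uid') raises KeyError when absent — Pre_ excludes that
def pvFlushStep (acc : PySem.Dict String (PySem.Dict String String)) (g : List String) :
    PySem.Dict String (PySem.Dict String String) :=
  if g.isEmpty then acc
  else acc.insert ((pvBuild g).getD "uid" "") ((pvBuild g).erase "uid")

def listsecs_py_alt (kllis : List String) (pattern : Option String) : List (String × List (String × String)) :=
  let gp := kllis.foldl pvGroupStep ([], [])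
  ((gp.1.foldl pvFlushStep PySem.Dict.empty).items.map (fun p => (p.1, p.2.items)))

-- ===== PRECONDITION & SPEC =====
-- Pre_ excludes exactly the inputs where both Pythons raise KeyError: a flushed group
-- (the lines since the previous 'sec' line, before a later 'sec' line) with no 'uid' field.
-- a line's first ':'-field is 'sec' (resp. 'uid') iff it is exactly "sec" or starts with "sec:"
def pvIsSec (kl : String) : Bool := kl == "sec" || PySem.Str.startswith kl "sec:"
def pvIsUid (kl : String) : Bool := kl == "uid" || PySem.Str.startswith kl "uid:"
def Pre_listsecs_py (kllis : List String) (pattern : Option String) : Prop :=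
  ∀ i ∈ List.range kllis.length, pvIsSec (kllis.getD i "") = true → 0 < i →
    ∃ j ∈ List.range i, pvIsUid (kllis.getD j "") = true ∧
      ∀ m ∈ List.range i, j < m → ¬ pvIsSec (kllis.getD m "") = true
instance (kllis : List String) (pattern : Option String) : Decidable (Pre_listsecs_py kllis pattern) := by unfold Pre_listsecs_py; infer_instance

def pvWitness_listsecs_py : List String × Option String := (["uid:alice", "name:a", "sec:k1"], none)

def Spec_listsecs_py (kllis : List String) (pattern : Option String) (out : List (String × List (String × String))) : Prop := out = listsecs_py_alt kllis pattern
instance (kllis : List String) (pattern : Option String) (out : List (String × List (String × String))) : Decidable (Spec_listsecs_py kllis pattern out) := by unfold Spec_listsecs_py; infer_instance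

-- ===== CLAIM (what is proved, stated in full; the proofs are below) =====
def Claim_equal_listsecs_py : Prop := ∀ (kllis : List String) (pattern : Option String), Dom_listsecs_py kllis pattern → Pre_listsecs_py kllis pattern → Spec_listsecs_py kllis pattern (listsecs_py kllis pattern)

-- ===== LEMMAS AND PROOFS =====

theorem pv_items_insert_ne_nil (d : PySem.Dict String String) (k : String) (v : String) :
    (d.insert k v).items ≠ [] := by
  rw [PySem.Dict.items_insert]
  by_cases h : d.contains k = true
  · simp only [h, if_true]
    intro hnil
    rcases List.map_eq_nil_iff.mp hnil with hitems
    have : k ∈ d.keys := (PySem.Dict.contains_iff_mem_keys d k).mp h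
    simp [PySem.Dict.keys, hitems] at this
  · simp [h]

theorem pvBuild_items_ne_nil (x : String) (g : List String) :
    (pvBuild (x :: g)).items ≠ [] := by
  suffices h : ∀ (l : List String) (d : PySem.Dict String String), d.items ≠ [] →
      (l.foldl (fun d kl => d.insert (pvField kl).1 (pvField kl).2) d).items ≠ [] by
    exact h g _ (pv_items_insert_ne_nil _ _ _)
  intro l
  induction l with
  | nil => intro d hd; exact hd
  | cons y ys ih =>
      intro d _
      exact ih _ (pv_items_insert_ne_nil _ _ _)

theorem pvBuild_append (cur : List String) (kl : String) :
    pvBuild (cur ++ [kl]) = (pvBuild cur).insert (pvField kl).1 (pvField kl).2 := by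
  simp [pvBuild, List.foldl_append]

-- the done-accumulator of pass 1 only ever grows on the right
theorem pvGroup_shift (ls : List String) (d0 : List (List String)) (c : List String) :
    ls.foldl pvGroupStep (d0, c) =
      (d0 ++ (ls.foldl pvGroupStep ([], c)).1, (ls.foldl pvGroupStep ([], c)).2) := by
  induction ls generalizing d0 c with
  | nil => simp
  | cons kl ls ih =>
      simp only [List.foldl_cons]
      by_cases h : (pvField kl).1 = "sec"
      · simp only [pvGroupStep, h, if_true, List.nil_append]
        rw [ih (d0 ++ [c]) [kl], ih [c] [kl]]
        simp [List.append_assoc]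
      · simp only [pvGroupStep, h, if_false]
        exact ih d0 (c ++ [kl])

-- main invariant: A's scan state equals B's (groups-so-far flushed, dict of current group)
theorem pv_main (ls : List String) (acc : PySem.Dict String (PySem.Dict String String))
    (cur : List String) :
    ls.foldl pvStepA (acc, pvBuild cur) =
      ((ls.foldl pvGroupStep ([], cur)).1.foldl pvFlushStep acc,
       pvBuild (ls.foldl pvGroupStep ([], cur)).2) := by
  induction ls generalizing acc cur with
  | nil => simp
  | cons kl ls ih =>
      simp only [List.foldl_cons]
      by_cases h : (pvField kl).1 = "sec"
      · have hg : pvGroupStep ([], cur) kl = ([cur], [kl]) := by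
          simp [pvGroupStep, h]
        rw [hg, pvGroup_shift ls [cur] [kl]]
        have hb1 : pvBuild [kl] = PySem.Dict.empty.insert (pvField kl).1 (pvField kl).2 := rfl
        cases cur with
        | nil =>
            have hstep : pvStepA (acc, pvBuild []) kl = (acc, pvBuild [kl]) := by
              simp [pvStepA, h, pvBuild]
              intro hc
              exact absurd rfl hc
            rw [hstep, ih acc [kl]]
            simp [pvFlushStep]
        | cons x xs =>
            have hne : (pvBuild (x :: xs)).items.isEmpty = false := by
              simpa [List.isEmpty_iff] using pvBuild_items_ne_nil x xs
            have hstep : pvStepA (acc, pvBuild (x :: xs)) kl =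
                (pvFlushStep acc (x :: xs), pvBuild [kl]) := by
              simp [pvStepA, pvFlushStep, h, hne, hb1]
            rw [hstep, ih (pvFlushStep acc (x :: xs)) [kl]]
            simp [List.foldl_cons]
      · have hg : pvGroupStep ([], cur) kl = ([], cur ++ [kl]) := by
          simp [pvGroupStep, h]
        have hstep : pvStepA (acc, pvBuild cur) kl = (acc, pvBuild (cur ++ [kl])) := by
          simp [pvStepA, h, pvBuild_append]
        rw [hstep, hg, ih acc (cur ++ [kl])]

-- ===== VERDICT (by name: the statement is the Claim_ definition above) =====
theorem listsecs_py_spec : Claim_equal_listsecs_py := by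
  intro kllis pattern _ _
  unfold Spec_listsecs_py listsecs_py listsecs_py_alt
  have h := pv_main kllis PySem.Dict.empty []
  have hcur : pvBuild ([] : List String) = PySem.Dict.empty := rfl
  rw [hcur] at h
  rw [h]
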